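-- pv_equiv track=rewrite | github.com/iamharsh25/Demografy | chat_history/context.py | build_context_block
-- ===== SOURCE A (Python) =====
-- from typing import Iterable, List
--
-- MAX_CONTEXT_CHARS = 4000
--
-- _HEADER = "Previous conversation (most recent last):\n"
--
-- def _format_turn(record: dict) -> str:
--     role = record.get("role", "")
--     content = (record.get("content") or "").strip()
--     if not content:
--         return ""
--     label = "User" if role == "user" else "Assistant"
--     return f"{label}: {content}\n"
--
-- def _pair_turns(turns: Iterable[dict]) -> List[List[dict]]:
--     """Group a flat turns list into [user, (assistant?)] pairs.
--
--     Anything that isn't a user message starting a fresh pair gets folded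
--     into the previous pair so we can drop "oldest pair first" cleanly
--     when the rendered context exceeds the soft cap.
--     """
--     pairs: List[List[dict]] = []
--     for record in turns:
--         if record.get("role") == "user" or not pairs:
--             pairs.append([record])
--         else:
--             pairs[-1].append(record)
--     return pairs
--
-- def build_context_block(turns: Iterable[dict]) -> str:
--     """Render ``turns`` as a transcript prefix for the agent.
--
--     Returns an empty string when no turns are provided so callers can
--     cheaply check truthiness instead of parsing the output.
--     """
--     pairs = _pair_turns(turns)
--     if not pairs:
--         return ""
--
--     while pairs:
--         rendered = _HEADER + "".join(
--             _format_turn(record) for pair in pairs for record in pair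
--         )
--         if len(rendered) <= MAX_CONTEXT_CHARS:
--             return rendered + "\n"
--         # Trim the oldest pair and try again.
--         pairs.pop(0)
--
--     return ""
-- ===== SOURCE B (Python) =====
-- MAX_CONTEXT_CHARS = 4000
--
-- _HEADER = "Previous conversation (most recent last):\n"
--
--
-- def _render(record):
--     content = (record.get("content") or "").strip()
--     if not content:
--         return ""
--     prefix = "User: " if record.get("role") == "user" else "Assistant: "
--     return prefix + content + "\n"
--
--
-- def build_context_block(turns):
--     # Group once into per-pair rendered texts (oldest first).
--     texts = []
--     for record in turns:
--         text = _render(record)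
--         if record.get("role") == "user" or not texts:
--             texts.append(text)
--         else:
--             texts[-1] += text
--     # One suffix-sum scan instead of re-rendering after every drop.
--     budget = MAX_CONTEXT_CHARS - len(_HEADER)
--     total = sum(len(t) for t in texts)
--     for i, t in enumerate(texts):
--         if total <= budget:
--             return _HEADER + "".join(texts[i:]) + "\n"
--         total -= len(t)
--     return ""
-- ===== Notes on version B (the rewrite author's own statement) =====
-- stated objective: alternative
-- what changed: B renders each turn once into per-pair texts and trims with a single suffix-sum scan over precomputed lengths, instead of A's while-loop that re-renders the entire remaining transcript after every dropped pair; same cost on typical inputs (re-rendering only repeats when many pairs are dropped).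
import Mathlib
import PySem

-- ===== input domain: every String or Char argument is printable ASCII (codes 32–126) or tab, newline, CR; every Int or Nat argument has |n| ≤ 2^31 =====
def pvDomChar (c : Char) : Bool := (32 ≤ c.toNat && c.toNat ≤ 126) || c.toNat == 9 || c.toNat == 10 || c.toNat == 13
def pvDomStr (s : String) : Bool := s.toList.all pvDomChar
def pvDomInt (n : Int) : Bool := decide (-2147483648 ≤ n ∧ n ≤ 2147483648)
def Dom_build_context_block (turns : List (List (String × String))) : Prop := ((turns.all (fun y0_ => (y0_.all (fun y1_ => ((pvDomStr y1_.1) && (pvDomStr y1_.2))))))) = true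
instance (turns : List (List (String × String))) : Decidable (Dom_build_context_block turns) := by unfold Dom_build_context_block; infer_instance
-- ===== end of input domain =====

-- B renders each turn once and trims with a single suffix-sum scan instead of re-rendering the
-- whole remaining transcript after every dropped pair (objective: alternative).

-- ===== PORT A =====
def pvHeader : String := "Previous conversation (most recent last):\n"

def pvFormatTurn (record : List (String × String)) : String :=
  let role := (record.lookup "role").getD ""
  let content := PySem.Str.strip ((record.lookup "content").getD "")
  if content = "" then ""
  else (if role = "user" then "User" else "Assistant") ++ ": " ++ content ++ "\n"

def pvPairTurns (turns : List (List (String × String))) : List (List (List (String × String))) :=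
  turns.foldl
    (fun pairs record =>
      if record.lookup "role" = some "user" ∨ pairs = [] then pairs ++ [[record]]
      else pairs.dropLast ++ [(pairs.getLast?.getD []) ++ [record]])
    []

def pvLoopA : List (List (List (String × String))) → String
  | [] => ""
  | p :: ps =>
    let rendered := pvHeader ++ PySem.Str.join "" ((p :: ps).flatMap (fun pair => pair.map pvFormatTurn))
    if PySem.Str.len rendered ≤ 4000 then rendered ++ "\n" else pvLoopA ps

def build_context_block (turns : List (List (String × String))) : String :=
  let pairs := pvPairTurns turns
  if pairs = [] then "" else pvLoopA pairs

-- ===== PORT B =====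
def pvRender (record : List (String × String)) : String :=
  let content := PySem.Str.strip ((record.lookup "content").getD "")
  if content = "" then ""
  else (if record.lookup "role" = some "user" then "User: " else "Assistant: ") ++ content ++ "\n"

def pvGroupTexts (turns : List (List (String × String))) : List String :=
  turns.foldl
    (fun texts record =>
      let text := pvRender record
      if record.lookup "role" = some "user" ∨ texts = [] then texts ++ [text]
      else texts.dropLast ++ [(texts.getLast?.getD "") ++ text])
    []

def pvLoopB : List String → Int → String
  | [], _ => ""
  | t :: ts, total =>
    if total ≤ 4000 - PySem.Str.len pvHeader then pvHeader ++ PySem.Str.join "" (t :: ts) ++ "\n"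
    else pvLoopB ts (total - PySem.Str.len t)

def build_context_block_alt (turns : List (List (String × String))) : String :=
  let texts := pvGroupTexts turns
  pvLoopB texts ((texts.map PySem.Str.len).sum)

-- ===== PRECONDITION & SPEC =====
def Spec_build_context_block (turns : List (List (String × String))) (out : String) : Prop := out = build_context_block_alt turns
instance (turns : List (List (String × String))) (out : String) : Decidable (Spec_build_context_block turns out) := by unfold Spec_build_context_block; infer_instance

-- ===== CLAIM (what is proved, stated in full; the proofs are below) =====
def Claim_equal_build_context_block : Prop := ∀ (turns : List (List (String × String))), Dom_build_context_block turns → Spec_build_context_block turns (build_context_block turns)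

-- ===== LEMMAS AND PROOFS =====

-- '' as separator: join is flatten
theorem pv_intercalate_nil (cs : List (List Char)) : List.intercalate [] cs = cs.flatten := by
  simp only [List.intercalate]
  induction cs with
  | nil => rfl
  | cons a t ih =>
    cases t with
    | nil => simp
    | cons b r => simp_all [List.intersperse]

theorem pv_join_cons (a : String) (l : List String) :
    PySem.Str.join "" (a :: l) = a ++ PySem.Str.join "" l := by
  apply String.toList_inj.mp
  simp [pysem, PySem.Chars.join, pv_intercalate_nil, String.toList_append]

theorem pv_join_singleton (a : String) : PySem.Str.join "" [a] = a := by
  apply String.toList_inj.mp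
  simp [pysem, PySem.Chars.join, pv_intercalate_nil]

theorem pv_join_append (as bs : List String) :
    PySem.Str.join "" (as ++ bs) = PySem.Str.join "" as ++ PySem.Str.join "" bs := by
  induction as with
  | nil =>
    apply String.toList_inj.mp
    simp [pysem, PySem.Chars.join, pv_intercalate_nil, String.toList_append]
  | cons a t ih =>
    rw [List.cons_append, pv_join_cons, pv_join_cons, ih, String.append_assoc]

theorem pv_len_join (l : List String) :
    PySem.Str.len (PySem.Str.join "" l) = (l.map PySem.Str.len).sum := by
  induction l with
  | nil => rfl
  | cons a t ih => rw [pv_join_cons, PySem.Str.len_append, ih, List.map_cons, List.sum_cons]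

theorem pv_join_flatMap {α : Type} (g : α → List String) (l : List α) :
    PySem.Str.join "" (l.flatMap g) = PySem.Str.join "" (l.map (fun x => PySem.Str.join "" (g x))) := by
  induction l with
  | nil => rfl
  | cons a t ih => rw [List.flatMap_cons, pv_join_append, List.map_cons, pv_join_cons, ih]

theorem pv_render_eq_format (record : List (String × String)) :
    pvRender record = pvFormatTurn record := by
  unfold pvRender pvFormatTurn
  cases h : record.lookup "role" with
  | none =>
    simp only [Option.getD_none]
    split
    · rfl
    · rw [if_neg (by decide), if_neg (by simp),
        show ("Assistant" ++ ": " : String) = "Assistant: " from by decide]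
  | some role =>
    simp only [Option.getD_some]
    split
    · rfl
    · by_cases hr : role = "user"
      · subst hr
        rw [if_pos rfl, if_pos rfl, show ("User" ++ ": " : String) = "User: " from by decide]
      · rw [if_neg (by simpa using hr), if_neg hr,
          show ("Assistant" ++ ": " : String) = "Assistant: " from by decide]

-- rendering of one pair of A's grouping
def pvRenderPair (pair : List (List (String × String))) : String :=
  PySem.Str.join "" (pair.map pvFormatTurn)

theorem pv_group_invariant (turns : List (List (String × String)))
    (pairs : List (List (List (String × String)))) :
    turns.foldl
      (fun texts record =>
        let text := pvRender record
        if record.lookup "role" = some "user" ∨ texts = [] then texts ++ [text]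
        else texts.dropLast ++ [(texts.getLast?.getD "") ++ text])
      (pairs.map pvRenderPair)
    = (turns.foldl
        (fun ps record =>
          if record.lookup "role" = some "user" ∨ ps = [] then ps ++ [[record]]
          else ps.dropLast ++ [(ps.getLast?.getD []) ++ [record]])
        pairs).map pvRenderPair := by
  induction turns generalizing pairs with
  | nil => rfl
  | cons r rest ih =>
    simp only [List.foldl_cons]
    have hempty : (pairs.map pvRenderPair = []) ↔ (pairs = []) := by simp
    by_cases hc : r.lookup "role" = some "user" ∨ pairs = []
    · rw [if_pos (by tauto), if_pos hc]
      have : (pairs ++ [[r]]).map pvRenderPair = pairs.map pvRenderPair ++ [pvRender r] := by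
        simp [pvRenderPair, pv_join_singleton, pv_render_eq_format]
      rw [← this, ih]
    · have hne : pairs ≠ [] := by tauto
      rw [if_neg (by rw [hempty]; exact hc), if_neg hc]
      have hlast : (pairs.map pvRenderPair).getLast?.getD ""
          = pvRenderPair (pairs.getLast?.getD []) := by
        rw [List.getLast?_map]
        cases hp : pairs.getLast? with
        | none => exact absurd (List.getLast?_eq_none_iff.mp hp) hne
        | some p => rfl
      have : (pairs.dropLast ++ [(pairs.getLast?.getD []) ++ [r]]).map pvRenderPair
          = (pairs.map pvRenderPair).dropLast
            ++ [((pairs.map pvRenderPair).getLast?.getD "") ++ pvRender r] := by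
        rw [List.map_append, List.map_dropLast, hlast]
        simp [pvRenderPair, pv_join_append, pv_join_singleton, pv_render_eq_format]
      rw [← this, ih]

theorem pv_group_eq (turns : List (List (String × String))) :
    pvGroupTexts turns = (pvPairTurns turns).map pvRenderPair := by
  unfold pvGroupTexts pvPairTurns
  simpa using pv_group_invariant turns []

theorem pv_loop_eq (pairs : List (List (List (String × String)))) :
    pvLoopA pairs = pvLoopB (pairs.map pvRenderPair) (((pairs.map pvRenderPair).map PySem.Str.len).sum) := by
  induction pairs with
  | nil => rfl
  | cons p ps ih =>
    simp only [pvLoopA, pvLoopB, List.map_cons, List.sum_cons]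
    have hbody : PySem.Str.join "" ((p :: ps).flatMap (fun pair => pair.map pvFormatTurn))
        = PySem.Str.join "" (pvRenderPair p :: ps.map pvRenderPair) := by
      rw [pv_join_flatMap]
      rfl
    have hlen : PySem.Str.len (pvHeader ++ PySem.Str.join "" ((p :: ps).flatMap (fun pair => pair.map pvFormatTurn)))
        = PySem.Str.len pvHeader
          + (PySem.Str.len (pvRenderPair p) + ((ps.map pvRenderPair).map PySem.Str.len).sum) := by
      rw [PySem.Str.len_append, hbody, pv_len_join]
      simp only [List.map_cons, List.sum_cons]
    by_cases hc : PySem.Str.len (pvRenderPair p) + ((ps.map pvRenderPair).map PySem.Str.len).sum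
        ≤ 4000 - PySem.Str.len pvHeader
    · rw [if_pos (by rw [hlen]; omega), if_pos hc, hbody]
    · rw [if_neg (by rw [hlen]; omega), if_neg hc, ih]
      congr 1
      ring

theorem build_context_block_spec : Claim_equal_build_context_block := by
  intro turns _
  unfold Spec_build_context_block build_context_block build_context_block_alt
  rw [pv_group_eq, ← pv_loop_eq]
  by_cases h : pvPairTurns turns = []
  · rw [if_pos h, h]
    rfl
  · rw [if_neg h]
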